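-- pv_equiv track=rewrite | github.com/jackyyy0228/Lyric_ASR | pyutils/song.py | splitTxt
-- ===== SOURCE A (Python) =====
-- def splitTxt(line):
--     tokens = line.split()
--     nowid = 0
--     now = ''
--     result = []
--     for token in  tokens:
--         if token == '|':
--             nowid += 1
--             if len(now) > 0:
--                 result.append(now)
--             now = ''
--         else:
--             if now == '':
--                 now = token
--             else:
--                 now = now + ' ' + token
--     result.append(now)
--     return result
-- ===== SOURCE B (Python) =====
-- def _groups(tokens):
--     # Partition the token list at each standalone '|' token.
--     if '|' not in tokens:
--         return [tokens]
--     k = tokens.index('|')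
--     return [tokens[:k]] + _groups(tokens[k + 1:])
--
--
-- def splitTxt(line):
--     groups = _groups(line.split())
--     return [' '.join(g) for g in groups[:-1] if g] + [' '.join(groups[-1])]
-- ===== Notes on version B (the rewrite author's own statement) =====
-- stated objective: simpler
-- what changed: Replaces the single stateful accumulator loop by a two-phase decomposition: recursively partition the token list at each '|' token, then join each group with spaces, dropping empty groups except the last.
import Mathlib
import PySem

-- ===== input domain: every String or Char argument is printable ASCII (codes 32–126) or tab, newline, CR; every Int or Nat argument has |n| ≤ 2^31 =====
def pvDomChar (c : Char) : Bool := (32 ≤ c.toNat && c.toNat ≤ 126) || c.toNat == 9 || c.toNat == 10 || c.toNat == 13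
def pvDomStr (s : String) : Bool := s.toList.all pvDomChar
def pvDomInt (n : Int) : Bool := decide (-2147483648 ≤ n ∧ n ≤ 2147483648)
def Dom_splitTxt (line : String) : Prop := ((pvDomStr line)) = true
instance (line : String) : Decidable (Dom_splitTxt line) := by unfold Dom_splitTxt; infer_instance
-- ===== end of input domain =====

-- B replaces A's single stateful accumulator loop with a two-phase decomposition:
-- partition the tokens at '|' and then join/filter the groups (objective: simpler).

-- ===== PORT A =====
-- the loop body of A (nowid is dead state in A and is omitted)
def pvStepA (st : String × List String) (token : String) : String × List String :=
  if token = "|" then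
    ("", if PySem.Str.len st.1 > 0 then st.2 ++ [st.1] else st.2)
  else
    ((if st.1 = "" then token else st.1 ++ " " ++ token), st.2)

def splitTxt (line : String) : List String :=
  let tokens := PySem.Str.split₀ line
  let st := tokens.foldl pvStepA ("", [])
  st.2 ++ [st.1]

-- ===== PORT B =====
-- Source B's _groups: partition the token list at each standalone '|' token
def pvGroups (ts : List String) : List (List String) :=
  match h : PySem.List.index? ts "|" with
  | none => [ts]
  | some k =>
      PySem.List.slice ts none (some (k : Int)) ::
        pvGroups (PySem.List.slice ts (some ((k : Int) + 1)) none)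
termination_by ts.length
decreasing_by
  obtain ⟨hk, -, -⟩ := PySem.List.getElem_of_index?_eq_some h
  rw [PySem.List.slice_from ts (by omega : (0:Int) ≤ (k : Int) + 1)]
  simp only [List.length_drop]
  omega

def splitTxt_alt (line : String) : List String :=
  let groups := pvGroups (PySem.Str.split₀ line)
  ((PySem.List.slice groups none (some (-1))).filter (fun g => !g.isEmpty)).map
      (fun g => PySem.Str.join " " g)
    ++ [PySem.Str.join " " (groups.getLastD [])]

-- ===== PRECONDITION & SPEC =====
def Spec_splitTxt (line : String) (out : List String) : Prop := out = splitTxt_alt line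
instance (line : String) (out : List String) : Decidable (Spec_splitTxt line out) := by unfold Spec_splitTxt; infer_instance

-- ===== CLAIM (what is proved, stated in full; the proofs are below) =====
def Claim_equal_splitTxt : Prop := ∀ (line : String), Dom_splitTxt line → Spec_splitTxt line (splitTxt line)

-- ===== LEMMAS AND PROOFS =====

theorem pvGroups_eq_none (ts : List String) (h : PySem.List.index? ts "|" = none) :
    pvGroups ts = [ts] := by
  rw [pvGroups.eq_def, h]

theorem pvGroups_eq_some (ts : List String) (k : Nat) (h : PySem.List.index? ts "|" = some k) :
    pvGroups ts = PySem.List.slice ts none (some (k : Int)) ::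
        pvGroups (PySem.List.slice ts (some ((k : Int) + 1)) none) := by
  rw [pvGroups.eq_def, h]

-- every token produced by str.split() is nonempty
theorem pvSplit_go_ne_nil (s : List Char) :
    ∀ cur acc, (∀ g ∈ acc, g ≠ []) →
      ∀ g ∈ PySem.Chars.split₀.go s cur acc, g ≠ [] := by
  induction s with
  | nil =>
    intro cur acc hacc g hg
    unfold PySem.Chars.split₀.go at hg
    by_cases hc : cur.isEmpty
    · simp [hc] at hg; exact hacc g hg
    · simp [hc] at hg
      rcases hg with h | h
      · exact hacc g h
      · subst h; simpa using (by simpa [List.isEmpty_iff] using hc)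
  | cons c rest ih =>
    intro cur acc hacc g hg
    unfold PySem.Chars.split₀.go at hg
    by_cases hs : PySem.Chars.isspace c
    · by_cases hc : cur.isEmpty
      · simp [hs, hc] at hg; exact ih [] acc hacc g hg
      · simp [hs, hc] at hg
        refine ih [] (cur.reverse :: acc) ?_ g hg
        intro g' hg'
        rcases List.mem_cons.mp hg' with h | h
        · subst h; simpa using (by simpa [List.isEmpty_iff] using hc)
        · exact hacc g' h
    · simp [hs] at hg; exact ih (c :: cur) acc hacc g hg

theorem pvTokens_ne_empty (line : String) :
    ∀ t ∈ PySem.Str.split₀ line, t ≠ "" := by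
  intro t ht
  simp only [PySem.Str.split₀, List.mem_map] at ht
  obtain ⟨cs, hcs, rfl⟩ := ht
  have hne : cs ≠ [] :=
    pvSplit_go_ne_nil line.toList [] [] (by simp) cs (by simpa [PySem.Chars.split₀] using hcs)
  intro h
  apply hne
  have := congrArg String.toList h
  simpa using this

-- concatenating tokens the way A does
def pvCat (now : String) (ts : List String) : String :=
  ts.foldl (fun n t => if n = "" then t else n ++ " " ++ t) now

theorem pvJoin_nil : PySem.Str.join " " [] = "" := by
  apply String.toList_inj.mp
  simp [PySem.Str.join, PySem.Chars.join_nil]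

theorem pvAppend_ne (now b : String) : now ++ " " ++ b ≠ "" := by
  intro h
  have := congrArg String.toList h
  simp at this

theorem pvJoin_cons_cons (a b : String) (l : List String) :
    PySem.Str.join " " (a :: b :: l) = a ++ " " ++ PySem.Str.join " " (b :: l) := by
  apply String.toList_inj.mp
  simp [PySem.Str.join]
  rw [PySem.Chars.join_cons_cons]
  simp

theorem pvJoin_singleton (a : String) : PySem.Str.join " " [a] = a := by
  apply String.toList_inj.mp
  simp [PySem.Str.join, PySem.Chars.join_singleton]

theorem pvCat_join (ts : List String) (hts : ∀ t ∈ ts, t ≠ "") :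
    pvCat "" ts = PySem.Str.join " " ts := by
  cases ts with
  | nil => simpa [pvCat] using pvJoin_nil.symm
  | cons a l =>
    have ha : a ≠ "" := hts a (by simp)
    have key : ∀ (l : List String) (now : String), now ≠ "" →
        pvCat now l = PySem.Str.join " " (now :: l) := by
      intro l
      induction l with
      | nil =>
        intro now hnow
        apply String.toList_inj.mp
        simp [pvCat, PySem.Str.join, PySem.Chars.join_singleton]
      | cons b l ih =>
        intro now hnow
        have h1 : pvCat now (b :: l) = pvCat (now ++ " " ++ b) l := by
          simp [pvCat, hnow]
        rw [h1, ih _ (pvAppend_ne now b), pvJoin_cons_cons now b l]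
        cases l with
        | nil => rw [pvJoin_singleton, pvJoin_singleton]
        | cons c l' =>
          rw [pvJoin_cons_cons (now ++ " " ++ b) c l', pvJoin_cons_cons b c l']
          simp [String.append_assoc]
    have h0 : pvCat "" (a :: l) = pvCat a l := by simp [pvCat]
    rw [h0, key l a ha]

theorem pvCat_eq_empty_iff (ts : List String) (hts : ∀ t ∈ ts, t ≠ "") :
    (pvCat "" ts = "") ↔ ts = [] := by
  constructor
  · intro h
    cases ts with
    | nil => rfl
    | cons a l =>
      exfalso
      have ha : a ≠ "" := hts a (by simp)
      have key : ∀ (l : List String) (now : String), now ≠ "" → pvCat now l ≠ "" := by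
        intro l
        induction l with
        | nil => intro now hnow; simpa [pvCat] using hnow
        | cons b l ih =>
          intro now hnow
          have h1 : pvCat now (b :: l) = pvCat (now ++ " " ++ b) l := by simp [pvCat, hnow]
          rw [h1]
          exact ih _ (pvAppend_ne now b)
      exact key l a ha (by simpa [pvCat, ha] using h)
  · intro h; subst h; rfl

-- A's fold over a '|'-free token list only extends `now`
theorem pvFold_nobar (ts : List String) (h : "|" ∉ ts) (st : String × List String) :
    ts.foldl pvStepA st = (pvCat st.1 ts, st.2) := by
  induction ts generalizing st with
  | nil => simp [pvCat]
  | cons a l ih =>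
    have ha : a ≠ "|" := by rintro rfl; exact h (by simp)
    have hl : "|" ∉ l := fun hm => h (by simp [hm])
    simp only [List.foldl_cons]
    rw [ih hl]
    simp [pvStepA, ha, pvCat]

-- B's group list is never empty
theorem pvGroups_ne_nil (ts : List String) : pvGroups ts ≠ [] := by
  rw [pvGroups.eq_def]
  split <;> simp

-- the output-assembly of B, as a function of the group list
def pvOut (gs : List (List String)) : List String :=
  ((PySem.List.slice gs none (some (-1))).filter (fun g => !g.isEmpty)).map
      (fun g => PySem.Str.join " " g)
    ++ [PySem.Str.join " " (gs.getLastD [])]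

theorem pvOut_cons (pre : List String) (gs : List (List String)) (h : gs ≠ []) :
    pvOut (pre :: gs) =
      (if pre = [] then [] else [PySem.Str.join " " pre]) ++ pvOut gs := by
  simp only [pvOut, PySem.List.slice_to_neg_one]
  rw [List.dropLast_cons_of_ne_nil h]
  have hlast : (pre :: gs).getLastD [] = gs.getLastD [] := by
    cases gs with
    | nil => exact absurd rfl h
    | cons b l => simp
  rw [hlast]
  by_cases hp : pre = []
  · simp [hp]
  · simp [hp]

-- the main invariant: A's loop, started with accumulator `res`, produces res ++ B's output
theorem pvMain : ∀ (n : Nat) (ts : List String), ts.length ≤ n →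
    (∀ t ∈ ts, t ≠ "") → ∀ (res : List String),
    (ts.foldl pvStepA ("", res)).2 ++ [(ts.foldl pvStepA ("", res)).1]
      = res ++ pvOut (pvGroups ts) := by
  intro n
  induction n with
  | zero =>
    intro ts hlen hts res
    have : ts = [] := List.eq_nil_of_length_eq_zero (Nat.le_zero.mp hlen)
    subst this
    rw [pvGroups_eq_none [] (by rw [PySem.List.index?_eq_none_iff]; simp)]
    simp [pvOut, PySem.List.slice_to_neg_one, pvJoin_nil]
  | succ n ih =>
    intro ts hlen hts res
    cases hidx : PySem.List.index? ts "|" with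
    | none =>
      have hnb : "|" ∉ ts := (PySem.List.index?_eq_none_iff ts "|").mp hidx
      rw [pvGroups_eq_none ts hidx, pvFold_nobar ts hnb ("", res)]
      simp only [pvOut, PySem.List.slice_to_neg_one]
      simp [pvCat_join ts hts]
    | some k =>
      obtain ⟨pre, suf, hsplit, hklen, hnpre⟩ := (PySem.List.index?_eq_some_iff ts "|" k).mp hidx
      have hkle : (k : Int) ≥ 0 := by positivity
      have htake : PySem.List.slice ts none (some (k : Int)) = pre := by
        rw [PySem.List.slice_to ts hkle]
        simp [hsplit, ← hklen]
      have hdrop : PySem.List.slice ts (some ((k : Int) + 1)) none = suf := by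
        rw [PySem.List.slice_from ts (by omega : (0:Int) ≤ (k : Int) + 1)]
        have : ((k : Int) + 1).toNat = k + 1 := by omega
        rw [this, hsplit, ← hklen]
        simp [List.drop_append]
      rw [pvGroups_eq_some ts k hidx, htake, hdrop]
      -- run A's fold over pre, the '|', then suf
      have hpre_tok : ∀ t ∈ pre, t ≠ "" := by
        intro t ht; exact hts t (by simp [hsplit, ht])
      have hsuf_tok : ∀ t ∈ suf, t ≠ "" := by
        intro t ht; exact hts t (by simp [hsplit, ht])
      have hsuflen : suf.length ≤ n := by
        have := congrArg List.length hsplit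
        simp at this
        omega
      have hfold : ts.foldl pvStepA ("", res)
          = suf.foldl pvStepA ("", if pvCat "" pre = "" then res else res ++ [pvCat "" pre]) := by
        rw [hsplit, List.foldl_append, pvFold_nobar pre hnpre ("", res)]
        simp only [List.foldl_cons]
        have hbar : pvStepA (pvCat "" pre, res) "|"
            = ("", if pvCat "" pre = "" then res else res ++ [pvCat "" pre]) := by
          simp only [pvStepA]
          by_cases hc : pvCat "" pre = ""
          · simp [hc]
          · have : PySem.Str.len (pvCat "" pre) > 0 := by
              rw [PySem.Str.len_eq]
              have : (pvCat "" pre).toList ≠ [] := by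
                intro hl; exact hc (String.toList_inj.mp (by simpa using hl))
              have := List.length_pos_iff.mpr this
              omega
            simp [hc]
        rw [hbar]
      rw [hfold, ih suf hsuflen hsuf_tok _]
      rw [pvOut_cons pre (pvGroups suf) (pvGroups_ne_nil suf)]
      by_cases hp : pre = []
      · have hc : pvCat "" pre = "" := by simp [hp, pvCat]
        simp [hp, pvCat]
      · have hne : pvCat "" pre ≠ "" := fun h => hp ((pvCat_eq_empty_iff pre hpre_tok).mp h)
        have hne' : PySem.Str.join " " pre ≠ "" := by
          rw [← pvCat_join pre hpre_tok]; exact hne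
        simp [hp, hne', pvCat_join pre hpre_tok]

-- ===== VERDICT (by name: the statement is the Claim_ definition above) =====
theorem splitTxt_spec : Claim_equal_splitTxt := by
  intro line _
  unfold Spec_splitTxt splitTxt splitTxt_alt
  simpa [pvOut] using
    pvMain (PySem.Str.split₀ line).length (PySem.Str.split₀ line) le_rfl
      (pvTokens_ne_empty line) []
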